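-- pv_equiv track=rewrite | github.com/james21411/NexusBi | backend/app/services/data_sources/sql_dump_strategy.py | _split_sql_columns
-- ===== SOURCE A (Python) =====
-- from typing import Dict, Any, List
--
-- def _split_sql_columns(columns_def: str) -> List[str]:
--     """Split column definitions handling nested parentheses"""
--     columns = []
--     current_col = ''
--     paren_count = 0
--
--     for char in columns_def:
--         if char == '(':
--             paren_count += 1
--         elif char == ')':
--             paren_count -= 1
--         elif char == ',' and paren_count == 0:
--             columns.append(current_col)
--             current_col = ''
--             continue
--
--         current_col += char
--
--     if current_col.strip():
--         columns.append(current_col)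
--
--     return columns
-- ===== SOURCE B (Python) =====
-- from typing import List
--
-- def _split_sql_columns(columns_def: str) -> List[str]:
--     """Split column definitions handling nested parentheses.
--
--     Two passes: first record the index of every comma at parenthesis
--     depth 0, then slice the string between consecutive cut points.
--     The final slice is kept only if it is non-blank."""
--     cuts = []
--     depth = 0
--     for i, ch in enumerate(columns_def):
--         if ch == '(':
--             depth += 1
--         elif ch == ')':
--             depth -= 1
--         elif ch == ',' and depth == 0:
--             cuts.append(i)
--     pieces = []
--     start = 0
--     for i in cuts:
--         pieces.append(columns_def[start:i])
--         start = i + 1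
--     last = columns_def[start:]
--     if last.strip():
--         pieces.append(last)
--     return pieces
-- ===== Notes on version B (the rewrite author's own statement) =====
-- stated objective: alternative
-- what changed: Replaced the single char-by-char scan that grows a string accumulator with two passes: one pass records the indices of depth-0 commas, a second pass slices the input between consecutive cut points (keeping the final slice only if non-blank).
import Mathlib
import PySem

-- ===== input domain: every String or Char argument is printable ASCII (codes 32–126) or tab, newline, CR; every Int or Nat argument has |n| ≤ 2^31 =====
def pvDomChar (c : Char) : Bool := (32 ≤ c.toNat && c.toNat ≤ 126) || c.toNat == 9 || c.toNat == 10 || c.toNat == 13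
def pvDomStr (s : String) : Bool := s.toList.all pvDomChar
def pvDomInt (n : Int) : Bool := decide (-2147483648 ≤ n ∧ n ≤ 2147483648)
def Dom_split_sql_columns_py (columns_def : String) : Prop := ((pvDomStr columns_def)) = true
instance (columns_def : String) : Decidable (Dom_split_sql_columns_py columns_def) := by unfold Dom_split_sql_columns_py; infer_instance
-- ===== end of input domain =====

-- B replaces A's single char-by-char scan with a string accumulator by two passes
-- (collect depth-0 comma indices, then slice between them); same cost, different decomposition.

-- B replaces A's single scan with a growing string accumulator by two passes
-- (first collect the indices of depth-0 commas, then slice the input between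
-- consecutive cut points); same behaviour, different decomposition.

-- ===== PORT A =====
-- one pass: grow current_col char by char, emit it at each depth-0 comma
def split_sql_columns_py (columns_def : String) : List String :=
  let st := columns_def.toList.foldl
    (fun (st : List (List Char) × List Char × Int) ch =>
      if ch = '(' then (st.1, st.2.1 ++ [ch], st.2.2 + 1)
      else if ch = ')' then (st.1, st.2.1 ++ [ch], st.2.2 - 1)
      else if ch = ',' ∧ st.2.2 = 0 then (st.1 ++ [st.2.1], ([] : List Char), st.2.2)
      else (st.1, st.2.1 ++ [ch], st.2.2))
    ([], [], 0)
  if PySem.Chars.strip st.2.1 ≠ [] then (st.1 ++ [st.2.1]).map String.ofList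
  else st.1.map String.ofList

-- ===== PORT B =====
-- pass 1: record the index of every depth-0 comma; pass 2: slice between consecutive cut points
def split_sql_columns_py_alt (columns_def : String) : List String :=
  let cs := columns_def.toList
  let cst := (PySem.List.enumerate cs 0).foldl
    (fun (st : List Int × Int) p =>
      if p.2 = '(' then (st.1, st.2 + 1)
      else if p.2 = ')' then (st.1, st.2 - 1)
      else if p.2 = ',' ∧ st.2 = 0 then (st.1 ++ [p.1], st.2)
      else st)
    ([], 0)
  let pst := cst.1.foldl
    (fun (st : List (List Char) × Int) i =>
      (st.1 ++ [PySem.List.slice cs (some st.2) (some i)], i + 1))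
    ([], 0)
  let last := PySem.List.slice cs (some pst.2) none
  if PySem.Chars.strip last ≠ [] then (pst.1 ++ [last]).map String.ofList
  else pst.1.map String.ofList

-- ===== PRECONDITION & SPEC =====
def Spec_split_sql_columns_py (columns_def : String) (out : List String) : Prop := out = split_sql_columns_py_alt columns_def
instance (columns_def : String) (out : List String) : Decidable (Spec_split_sql_columns_py columns_def out) := by unfold Spec_split_sql_columns_py; infer_instance

-- ===== CLAIM (what is proved, stated in full; the proofs are below) =====
def Claim_equal_split_sql_columns_py : Prop := ∀ (columns_def : String), Dom_split_sql_columns_py columns_def → Spec_split_sql_columns_py columns_def (split_sql_columns_py columns_def)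

-- ===== LEMMAS AND PROOFS =====

def pvUpd (d : Int) (c : Char) : Int := if c = '(' then d + 1 else if c = ')' then d - 1 else d
def pvSegs : List Char → Int → List (List Char)
  | [], _ => [[]]
  | c :: cs, d =>
    if c = ',' ∧ d = 0 then [] :: pvSegs cs d
    else (pvSegs cs (pvUpd d c)).modifyHead (c :: ·)

theorem pvSegs_ne_nil (cs : List Char) (d : Int) : pvSegs cs d ≠ [] := by
  cases cs with
  | nil => simp [pvSegs]
  | cons c cs =>
    simp only [pvSegs]
    split
    · simp
    · exact fun h => pvSegs_ne_nil cs (pvUpd d c) (by simpa using List.modifyHead_eq_nil_iff.mp h)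

theorem pvA_fold (cs : List Char) (cols : List (List Char)) (cur : List Char) (d : Int) :
    (cs.foldl
      (fun (st : List (List Char) × List Char × Int) ch =>
        if ch = '(' then (st.1, st.2.1 ++ [ch], st.2.2 + 1)
        else if ch = ')' then (st.1, st.2.1 ++ [ch], st.2.2 - 1)
        else if ch = ',' ∧ st.2.2 = 0 then (st.1 ++ [st.2.1], ([] : List Char), st.2.2)
        else (st.1, st.2.1 ++ [ch], st.2.2))
      (cols, cur, d)).1 = cols ++ ((pvSegs cs d).modifyHead (cur ++ ·)).dropLast
    ∧ (cs.foldl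
      (fun (st : List (List Char) × List Char × Int) ch =>
        if ch = '(' then (st.1, st.2.1 ++ [ch], st.2.2 + 1)
        else if ch = ')' then (st.1, st.2.1 ++ [ch], st.2.2 - 1)
        else if ch = ',' ∧ st.2.2 = 0 then (st.1 ++ [st.2.1], ([] : List Char), st.2.2)
        else (st.1, st.2.1 ++ [ch], st.2.2))
      (cols, cur, d)).2.1 = ((pvSegs cs d).modifyHead (cur ++ ·)).getLastD [] := by
  induction cs generalizing cols cur d with
  | nil => simp [pvSegs]
  | cons c cs ih =>
    simp only [List.foldl_cons]
    by_cases h1 : c = '('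
    · subst h1
      simp only [pvSegs, pvUpd]
      have hfe : ((fun x => cur ++ x) ∘ (fun x => '(' :: x)) = (fun x => (cur ++ ['(']) ++ x) := by
        funext x; simp
      simp
      simp only [hfe]
      simpa using ih cols (cur ++ ['(']) (d + 1)
    · by_cases h2 : c = ')'
      · subst h2
        simp only [pvSegs, pvUpd]
        have hfe : ((fun x => cur ++ x) ∘ (fun x => ')' :: x)) = (fun x => (cur ++ [')']) ++ x) := by
          funext x; simp
        simp
        simp only [hfe]
        simpa using ih cols (cur ++ [')']) (d - 1)
      · by_cases h3 : c = ',' ∧ d = 0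
        · obtain ⟨hc, hd⟩ := h3; subst hc; subst hd
          simp only [pvSegs, pvUpd]
          simp
          have hne := pvSegs_ne_nil cs 0
          obtain ⟨hA, hB⟩ := ih (cols ++ [cur]) [] 0
          constructor
          · rw [hA]
            cases h : pvSegs cs 0 with
            | nil => exact absurd h hne
            | cons a l => simp
          · rw [hB]
            cases h : pvSegs cs 0 with
            | nil => exact absurd h hne
            | cons a l => simp
        · simp only [pvSegs, pvUpd, if_neg h1, if_neg h2, if_neg h3]
          have hfe : ((fun x => cur ++ x) ∘ (fun x => c :: x)) = (fun x => (cur ++ [c]) ++ x) := by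
            funext x; simp
          simp only [List.modifyHead_modifyHead]
          simp only [hfe]
          simpa using ih cols (cur ++ [c]) d

def pvCuts : List Char → Nat → Int → List Int
  | [], _, _ => []
  | c :: cs, k, d =>
    if c = ',' ∧ d = 0 then (k : Int) :: pvCuts cs (k + 1) d else pvCuts cs (k + 1) (pvUpd d c)

def pvFinStart : List Char → Nat → Nat → Int → Nat
  | [], _, s, _ => s
  | c :: cs, k, s, d =>
    if c = ',' ∧ d = 0 then pvFinStart cs (k + 1) (k + 1) d else pvFinStart cs (k + 1) s (pvUpd d c)

theorem pvB_cuts (cs : List Char) (k : Nat) (d : Int) (acc : List Int) :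
    ((PySem.List.enumerate cs (k : Int)).foldl
      (fun (st : List Int × Int) p =>
        if p.2 = '(' then (st.1, st.2 + 1)
        else if p.2 = ')' then (st.1, st.2 - 1)
        else if p.2 = ',' ∧ st.2 = 0 then (st.1 ++ [p.1], st.2)
        else st)
      (acc, d)).1 = acc ++ pvCuts cs k d := by
  induction cs generalizing k d acc with
  | nil => simp [pvCuts, PySem.List.enumerate_nil]
  | cons c cs ih =>
    rw [PySem.List.enumerate_cons]
    simp only [List.foldl_cons]
    have hk1 : ((k : Int) + 1) = ((k + 1 : Nat) : Int) := by push_cast; ring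
    rw [hk1]
    by_cases h1 : c = '('
    · subst h1
      simp only [pvCuts, pvUpd]
      simpa using ih (k + 1) (d + 1) acc
    · by_cases h2 : c = ')'
      · subst h2
        simp only [pvCuts, pvUpd]
        simpa using ih (k + 1) (d - 1) acc
      · by_cases h3 : c = ',' ∧ d = 0
        · obtain ⟨hc, hd⟩ := h3; subst hc; subst hd
          simp only [pvCuts, pvUpd]
          simpa using ih (k + 1) 0 (acc ++ [(k : Int)])
        · simp only [pvCuts, pvUpd, if_neg h1, if_neg h2, if_neg h3]
          have hstep : (if c = '(' then (acc, d + 1)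
              else if c = ')' then (acc, d - 1)
              else if c = ',' ∧ d = 0 then (acc ++ [((k:Nat) : Int)], d) else (acc, d)) = (acc, d) := by
            rw [if_neg h1, if_neg h2, if_neg h3]
          simpa [hstep] using ih (k + 1) d acc

theorem pvB_start (full : List Char) (cs : List Char) (k s : Nat) (d : Int)
    (acc : List (List Char)) :
    ((pvCuts cs k d).foldl
      (fun (st : List (List Char) × Int) i =>
        (st.1 ++ [PySem.List.slice full (some st.2) (some i)], i + 1))
      (acc, (s : Int))).2 = ((pvFinStart cs k s d : Nat) : Int) := by
  induction cs generalizing k s d acc with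
  | nil => simp [pvCuts, pvFinStart]
  | cons c cs ih =>
    simp only [pvCuts, pvFinStart]
    by_cases h3 : c = ',' ∧ d = 0
    · rw [if_pos h3, if_pos h3]
      simp only [List.foldl_cons]
      have hk1 : ((k : Int) + 1) = ((k + 1 : Nat) : Int) := by push_cast; ring
      rw [hk1, ih]
    · rw [if_neg h3, if_neg h3]
      exact ih (k + 1) s (pvUpd d c) acc

theorem pvB_pieces (full : List Char) (cs : List Char) (k s : Nat) (d : Int)
    (acc : List (List Char)) (hcs : cs = full.drop k) (hk : k ≤ full.length) (hs : s ≤ k) :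
    ((pvCuts cs k d).foldl
      (fun (st : List (List Char) × Int) i =>
        (st.1 ++ [PySem.List.slice full (some st.2) (some i)], i + 1))
      (acc, (s : Int))).1
      = acc ++ ((pvSegs cs d).modifyHead ((full.drop s).take (k - s) ++ ·)).dropLast := by
  induction cs generalizing k s d acc with
  | nil => simp [pvCuts, pvSegs]
  | cons c cs ih =>
    have hlt : k < full.length := by
      by_contra h
      have : full.drop k = [] := List.drop_eq_nil_of_le (by omega)
      rw [this] at hcs; exact List.cons_ne_nil _ _ hcs
    have hcs' : cs = full.drop (k + 1) := by
      have : full.drop (k + 1) = (full.drop k).drop 1 := by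
        rw [List.drop_drop]
      rw [this, ← hcs]
      rfl
    have hgetk : full[k]? = some c := by
      have h0 : (full.drop k)[0]? = some c := by rw [← hcs]; rfl
      rw [List.getElem?_drop] at h0
      simpa using h0
    have htake : (full.drop s).take (k + 1 - s) = (full.drop s).take (k - s) ++ [c] := by
      have h1 : k + 1 - s = (k - s) + 1 := by omega
      rw [h1, List.take_add_one]
      have h2 : (full.drop s)[k - s]? = some c := by
        rw [List.getElem?_drop]
        rw [show s + (k - s) = k from by omega]
        exact hgetk
      rw [h2]
      rfl
    simp only [pvCuts, pvSegs]
    by_cases h3 : c = ',' ∧ d = 0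
    · rw [if_pos h3, if_pos h3]
      simp only [List.foldl_cons]
      have hslice : PySem.List.slice full (some (s : Int)) (some (k : Int))
          = (full.drop s).take (k - s) := PySem.List.slice_natCast full s k
      have hk1 : ((k : Int) + 1) = ((k + 1 : Nat) : Int) := by push_cast; ring
      rw [hslice, hk1]
      rw [ih (k + 1) (k + 1) d (acc ++ [(full.drop s).take (k - s)]) hcs' (by omega) le_rfl]
      have hmh : (pvSegs cs d).modifyHead ((full.drop (k+1)).take (k + 1 - (k + 1)) ++ ·)
          = pvSegs cs d := by
        simp only [Nat.sub_self, List.take_zero, List.nil_append]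
        exact congrFun List.modifyHead_id _
      rw [hmh]
      have hne := pvSegs_ne_nil cs d
      cases h : pvSegs cs d with
      | nil => exact absurd h hne
      | cons a l =>
        simp [List.dropLast_cons_of_ne_nil]
    · rw [if_neg h3, if_neg h3]
      rw [ih (k + 1) s (pvUpd d c) acc hcs' (by omega) (by omega)]
      have hfe : ((fun x => (full.drop s).take (k - s) ++ x) ∘ (fun x => c :: x))
          = (fun x => (full.drop s).take (k + 1 - s) ++ x) := by
        funext x
        simp [htake]
      rw [List.modifyHead_modifyHead, hfe]

theorem pvB_last (full : List Char) (cs : List Char) (k s : Nat) (d : Int)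
    (hcs : cs = full.drop k) (hk : k ≤ full.length) (hs : s ≤ k) :
    full.drop (pvFinStart cs k s d)
      = ((pvSegs cs d).modifyHead ((full.drop s).take (k - s) ++ ·)).getLastD [] := by
  induction cs generalizing k s d with
  | nil =>
    simp only [pvFinStart, pvSegs]
    have hlen : full.length ≤ k := by
      by_contra h
      have : full.drop k ≠ [] := by
        apply List.ne_nil_of_length_pos
        rw [List.length_drop]
        omega
      exact this hcs.symm
    have : (full.drop s).take (k - s) = full.drop s := by
      apply List.take_of_length_le
      rw [List.length_drop]
      omega
    simp [this]
  | cons c cs ih =>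
    have hlt : k < full.length := by
      by_contra h
      have : full.drop k = [] := List.drop_eq_nil_of_le (by omega)
      rw [this] at hcs; exact List.cons_ne_nil _ _ hcs
    have hcs' : cs = full.drop (k + 1) := by
      have : full.drop (k + 1) = (full.drop k).drop 1 := by rw [List.drop_drop]
      rw [this, ← hcs]
      rfl
    have hgetk : full[k]? = some c := by
      have h0 : (full.drop k)[0]? = some c := by rw [← hcs]; rfl
      rw [List.getElem?_drop] at h0
      simpa using h0
    have htake : (full.drop s).take (k + 1 - s) = (full.drop s).take (k - s) ++ [c] := by
      have h1 : k + 1 - s = (k - s) + 1 := by omega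
      rw [h1, List.take_add_one]
      have h2 : (full.drop s)[k - s]? = some c := by
        rw [List.getElem?_drop]
        rw [show s + (k - s) = k from by omega]
        exact hgetk
      rw [h2]
      rfl
    simp only [pvFinStart, pvSegs]
    by_cases h3 : c = ',' ∧ d = 0
    · rw [if_pos h3, if_pos h3]
      rw [ih (k + 1) (k + 1) d hcs' (by omega) le_rfl]
      have hmh : (pvSegs cs d).modifyHead ((full.drop (k+1)).take (k + 1 - (k + 1)) ++ ·)
          = pvSegs cs d := by
        simp only [Nat.sub_self, List.take_zero, List.nil_append]
        exact congrFun List.modifyHead_id _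
      rw [hmh]
      have hne := pvSegs_ne_nil cs d
      cases h : pvSegs cs d with
      | nil => exact absurd h hne
      | cons a l => simp
    · rw [if_neg h3, if_neg h3]
      rw [ih (k + 1) s (pvUpd d c) hcs' (by omega) (by omega)]
      have hfe : ((fun x => (full.drop s).take (k - s) ++ x) ∘ (fun x => c :: x))
          = (fun x => (full.drop s).take (k + 1 - s) ++ x) := by
        funext x
        simp [htake]
      rw [List.modifyHead_modifyHead, hfe]

theorem pv_final (s : String) : split_sql_columns_py s = split_sql_columns_py_alt s := by
  unfold split_sql_columns_py split_sql_columns_py_alt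
  dsimp only
  obtain ⟨hA1, hA2⟩ := pvA_fold s.toList [] [] 0
  have hc := pvB_cuts s.toList 0 0 []
  have hp := pvB_pieces s.toList s.toList 0 0 0 [] (by simp : s.toList = s.toList.drop 0) (Nat.zero_le _) le_rfl
  have hst := pvB_start s.toList s.toList 0 0 0 []
  have hl := pvB_last s.toList s.toList 0 0 0 (by simp : s.toList = s.toList.drop 0) (Nat.zero_le _) le_rfl
  simp only [Nat.cast_zero] at hc hp hst
  rw [hA1, hA2, hc]
  simp only [List.nil_append]
  rw [hp, hst]
  have hmh : (pvSegs s.toList 0).modifyHead ((s.toList.drop 0).take (0 - 0) ++ ·)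
      = pvSegs s.toList 0 := by
    simp only [Nat.sub_self, List.take_zero, List.nil_append]
    exact congrFun List.modifyHead_id _
  have hid : List.modifyHead (fun x : List Char => x) (pvSegs s.toList 0) = pvSegs s.toList 0 :=
    congrFun List.modifyHead_id _
  rw [hid, hmh]
  have hlast : PySem.List.slice s.toList (some ((pvFinStart s.toList 0 0 0 : Nat) : Int)) none
      = ((pvSegs s.toList 0).getLastD []) := by
    rw [PySem.List.slice_from_natCast, hl, hmh]
  rw [hlast]
  simp

-- ===== VERDICT (by name: the statement is the Claim_ definition above) =====
theorem split_sql_columns_py_spec : Claim_equal_split_sql_columns_py := by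
  intro columns_def _
  unfold Spec_split_sql_columns_py
  exact pv_final columns_def
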